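-- pv_equiv track=rewrite | github.com/DeadRigger/Sudoku | test_generate_sudoku.py | generate_base_field
-- ===== SOURCE A (Python) =====
-- def generate_base_field(size):
-- 	grid = [[0 for i in range(size ** 2)] for j in range(size ** 2)]
-- 	numbers = [i + 1 for i in range(size ** 2)]
-- 	for brow in range(size):
-- 		for row in range(size):
-- 			for bcol in range(size):
-- 				for col in range(size):
-- 					r, c = brow * size + row, bcol * size + col
-- 					if not row and not brow:
-- 						grid[r][c] = numbers.pop()
-- 					else:
-- 						grid[r][c] = grid[r - brow * size - row][(c - size * row - brow) % size ** 2]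
-- 	return grid
-- ===== SOURCE B (Python) =====
-- def generate_base_field(size):
--     n = size ** 2
--     grid = [[0 for _ in range(n)] for _ in range(n)]
--     first_row = list(range(n, 0, -1))
--     for brow in range(size):
--         for row in range(size):
--             k = -(size * row + brow) % n
--             grid[brow * size + row] = first_row[k:] + first_row[:k]
--     return grid
-- ===== Notes on version B (the rewrite author's own statement) =====
-- stated objective: simpler
-- what changed: B precomputes the first row once and builds every other row as a whole-row rotation (slice concatenation) of it, replacing A's cell-by-cell pops into row 0 and per-cell back-indexing into grid[0].
import Mathlib
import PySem

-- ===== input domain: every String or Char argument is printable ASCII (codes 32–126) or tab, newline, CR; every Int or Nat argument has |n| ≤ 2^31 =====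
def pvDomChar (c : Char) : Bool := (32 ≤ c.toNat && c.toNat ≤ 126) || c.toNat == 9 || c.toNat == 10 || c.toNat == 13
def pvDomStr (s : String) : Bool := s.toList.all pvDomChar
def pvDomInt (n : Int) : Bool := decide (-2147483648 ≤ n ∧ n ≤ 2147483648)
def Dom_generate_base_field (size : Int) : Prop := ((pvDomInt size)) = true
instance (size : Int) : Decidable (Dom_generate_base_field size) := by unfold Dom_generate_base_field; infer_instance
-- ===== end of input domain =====

-- B replaces A's pop-filled first row plus per-cell back-indexing into grid[0] by
-- whole-row rotations of a precomputed first row (objective: simpler).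

-- ===== PORT A =====
-- Python assignment `grid[r][c] = v`; exact for the nonnegative in-range indices A uses
-- (every assignment in A has 0 ≤ r, c < size², so the IndexError case never occurs).
def pySet2 (g : List (List Int)) (r c : Int) (v : Int) : List (List Int) :=
  PySem.List.pySetD g r (PySem.List.pySetD (PySem.List.pyGetD g r []) c v)

def generate_base_field (size : Int) : List (List Int) :=
  let grid : List (List Int) :=
    (PySem.List.pyRange 0 (size ^ 2) 1).map (fun _ =>
      (PySem.List.pyRange 0 (size ^ 2) 1).map (fun _ => (0 : Int)))
  let numbers : List Int := (PySem.List.pyRange 0 (size ^ 2) 1).map (fun i => i + 1)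
  let st :=
    (PySem.List.pyRange 0 size 1).foldl (fun st brow =>
      (PySem.List.pyRange 0 size 1).foldl (fun st row =>
        (PySem.List.pyRange 0 size 1).foldl (fun st bcol =>
          (PySem.List.pyRange 0 size 1).foldl (fun st col =>
            let r := brow * size + row
            let c := bcol * size + col
            if row = 0 ∧ brow = 0 then
              -- numbers.pop(); the `none` (IndexError) case is unreachable: numbers is
              -- nonempty at each of the size² pops
              match PySem.List.pop? st.2 with
              | some (v, rest) => (pySet2 st.1 r c v, rest)
              | none => st
            else
              (pySet2 st.1 r c
                (PySem.List.pyGetD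
                  (PySem.List.pyGetD st.1 (r - brow * size - row) [])
                  (PySem.Int.mod (c - size * row - brow) (size ^ 2)) 0),
               st.2)) st) st) st) (grid, numbers)
  st.1

-- ===== PORT B =====
def generate_base_field_alt (size : Int) : List (List Int) :=
  let n := size ^ 2
  let grid : List (List Int) :=
    (PySem.List.pyRange 0 n 1).map (fun _ => (PySem.List.pyRange 0 n 1).map (fun _ => (0 : Int)))
  let first_row := PySem.List.pyRange n 0 (-1)
  (PySem.List.pyRange 0 size 1).foldl (fun grid brow =>
    (PySem.List.pyRange 0 size 1).foldl (fun grid row =>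
      let k := PySem.Int.mod (-(size * row + brow)) n
      PySem.List.pySetD grid (brow * size + row)
        (PySem.List.slice first_row (some k) none ++ PySem.List.slice first_row none (some k)))
      grid) grid

-- ===== PRECONDITION & SPEC =====
def Spec_generate_base_field (size : Int) (out : List (List Int)) : Prop := out = generate_base_field_alt size
instance (size : Int) (out : List (List Int)) : Decidable (Spec_generate_base_field size out) := by unfold Spec_generate_base_field; infer_instance

-- ===== CLAIM (what is proved, stated in full; the proofs are below) =====
def Claim_equal_generate_base_field : Prop := ∀ (size : Int), Dom_generate_base_field size → Spec_generate_base_field size (generate_base_field size)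

-- ===== LEMMAS AND PROOFS =====

-- Proof-side abbreviations
def gsetg (g : List (List Int)) (r c : Nat) (v : Int) : List (List Int) :=
  g.set r ((g.getD r []).set c v)

def gshift (s r : Int) : Int := s * PySem.Int.mod r s + PySem.Int.floordiv r s

-- canonical Nat-indexed loop body of A after flattening the block loops
def gFN (s : Int) (st : List (List Int) × List Int) (r c : Nat) : List (List Int) × List Int :=
  if r = 0 then
    match PySem.List.pop? st.2 with
    | some (v, rest) => (gsetg st.1 0 c v, rest)
    | none => st
  else
    (gsetg st.1 r c
      ((st.1.getD 0 []).getD (PySem.Int.mod ((c : Int) - gshift s (r : Int)) (s ^ 2)).toNat 0),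
     st.2)

def gmkrow (s : Int) (row0 : List Int) (r : Nat) : List Int :=
  (List.range (s ^ 2).toNat).map
    (fun c : Nat => row0.getD (PySem.Int.mod ((c : Int) - gshift s (r : Int)) (s ^ 2)).toNat 0)

-- a for-loop over range(s) whose body only uses an offset index
theorem inner_shift {σ : Type} (f : σ → Int → σ) (o s : Int) (init : σ) :
    (PySem.List.pyRange 0 s 1).foldl (fun st c => f st (o + c)) init
      = (PySem.List.pyRange o (o + s) 1).foldl f init := by
  rw [PySem.List.pyRange_one 0 s, PySem.List.pyRange_one o (o + s)]
  simp [List.foldl_map]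

-- the two block loops 'for b in range(t): for c in range(s)' over index b*s+c are one loop
theorem flatten_aux {σ : Type} (s : Int) (hs : 0 ≤ s) (f : σ → Int → σ) :
    ∀ (t : Nat) (init : σ),
      (PySem.List.pyRange 0 (t : Int) 1).foldl
          (fun st b => (PySem.List.pyRange 0 s 1).foldl (fun st c => f st (b * s + c)) st) init
        = (PySem.List.pyRange 0 ((t : Int) * s) 1).foldl f init := by
  intro t
  induction t with
  | zero => simp [PySem.List.pyRange_one]
  | succ t ih =>
    intro init
    have h1 : ((t + 1 : Nat) : Int) = (t : Int) + 1 := by push_cast; ring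
    have h2 : ((t : Nat) + 1 : Int) * s = (t : Int) * s + s := by ring
    rw [h1, PySem.List.pyRange_one_succ_right (by positivity), List.foldl_append, ih,
      h2, PySem.List.pyRange_one_append 0 ((t : Int) * s) ((t : Int) * s + s) (by positivity) (by linarith),
      List.foldl_append]
    simp only [List.foldl_cons, List.foldl_nil]
    exact inner_shift f ((t : Int) * s) s _

theorem flatten {σ : Type} (s : Int) (hs : 0 ≤ s) (f : σ → Int → σ) (init : σ) :
    (PySem.List.pyRange 0 s 1).foldl
        (fun st b => (PySem.List.pyRange 0 s 1).foldl (fun st c => f st (b * s + c)) st) init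
      = (PySem.List.pyRange 0 (s ^ 2) 1).foldl f init := by
  have h : ((s.toNat : Nat) : Int) = s := Int.toNat_of_nonneg hs
  have := flatten_aux s hs f s.toNat init
  rw [h] at this
  rw [this]; ring_nf

theorem block_divmod {s b c : Int} (hs : 0 < s) (_hb : 0 ≤ b) (hc : 0 ≤ c) (hcs : c < s) :
    PySem.Int.floordiv (b * s + c) s = b ∧ PySem.Int.mod (b * s + c) s = c := by
  have hfd : PySem.Int.floordiv (b * s + c) s = b := by
    rw [PySem.Int.floordiv_eq_iff_of_pos hs]
    constructor <;> nlinarith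
  refine ⟨hfd, ?_⟩
  have := PySem.Int.floordiv_mul_add_mod (b * s + c) s
  rw [hfd] at this; linarith

theorem zero_block {s brow row : Int} (hs : 0 < s) (hb : 0 ≤ brow) (hr : 0 ≤ row) (_hrs : row < s) :
    (row = 0 ∧ brow = 0) ↔ brow * s + row = 0 := by
  constructor
  · rintro ⟨h1, h2⟩; simp [h1, h2]
  · intro h
    have : 0 ≤ brow * s := mul_nonneg hb (le_of_lt hs)
    rcases lt_or_eq_of_le hb with h1 | h1
    · nlinarith
    · constructor <;> nlinarith

-- Int-indexed canonical body (intermediate between A's literal loops and gFN)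
def gFInt (s : Int) (st : List (List Int) × List Int) (r c : Int) : List (List Int) × List Int :=
  if r = 0 then
    match PySem.List.pop? st.2 with
    | some (v, rest) => (pySet2 st.1 r c v, rest)
    | none => st
  else
    (pySet2 st.1 r c
      (PySem.List.pyGetD (PySem.List.pyGetD st.1 0 [])
        (PySem.Int.mod (c - gshift s r) (s ^ 2)) 0),
     st.2)

-- A's literal loop body for fixed (brow, row), flattened over the column index c
def gbodyInt (s brow row : Int) (st : List (List Int) × List Int) (c : Int) :
    List (List Int) × List Int :=
  if row = 0 ∧ brow = 0 then
    match PySem.List.pop? st.2 with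
    | some (v, rest) => (pySet2 st.1 (brow * s + row) c v, rest)
    | none => st
  else
    (pySet2 st.1 (brow * s + row) c
      (PySem.List.pyGetD (PySem.List.pyGetD st.1 (brow * s + row - brow * s - row) [])
        (PySem.Int.mod (c - s * row - brow) (s ^ 2)) 0),
     st.2)

theorem inner_flatten (s : Int) (hs : 0 ≤ s) (brow row : Int) (st : List (List Int) × List Int) :
    (PySem.List.pyRange 0 s 1).foldl
      (fun st bcol => (PySem.List.pyRange 0 s 1).foldl
        (fun st col => gbodyInt s brow row st (bcol * s + col)) st) st
      = (PySem.List.pyRange 0 (s ^ 2) 1).foldl (gbodyInt s brow row) st :=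
  flatten s hs (gbodyInt s brow row) st

theorem body_canon (s : Int) (hs : 0 < s) (brow row : Int)
    (hb : 0 ≤ brow) (_hb' : brow < s) (hr : 0 ≤ row) (hr' : row < s)
    (st : List (List Int) × List Int) (c : Int) :
    gbodyInt s brow row st c = gFInt s st (brow * s + row) c := by
  have hz := zero_block (brow := brow) (row := row) hs hb hr hr'
  have hdm := block_divmod (b := brow) (c := row) hs hb hr hr'
  have hsh : gshift s (brow * s + row) = s * row + brow := by
    unfold gshift; rw [hdm.1, hdm.2]
  unfold gbodyInt gFInt
  rw [if_congr hz rfl rfl]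
  by_cases h0 : brow * s + row = 0
  · simp [h0]
  · simp only [if_neg h0, hsh]
    have h1 : brow * s + row - brow * s - row = 0 := by ring
    have h2 : c - s * row - brow = c - (s * row + brow) := by ring
    rw [h1, h2]

theorem FInt_cast (s : Int) (hs : 0 < s) (st : List (List Int) × List Int) (r c : Nat) :
    gFInt s st (r : Int) (c : Int) = gFN s st r c := by
  have hn : (0 : Int) < s ^ 2 := by positivity
  unfold gFInt gFN
  by_cases hr : r = 0
  · subst hr
    cases hpop : PySem.List.pop? st.2 with
    | none => simp
    | some p =>
      simp [pySet2, gsetg, PySem.List.pySetD_of_nonneg, PySem.List.pyGetD_zero, List.getD]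
  · have hr' : ((r : Int)) ≠ 0 := by exact_mod_cast hr
    rw [if_neg hr', if_neg hr]
    rw [PySem.List.pyGetD_of_nonneg _ _ (PySem.Int.mod_nonneg _ hn)]
    simp [pySet2, gsetg, PySem.List.pyGetD_zero, List.getD]

theorem canon (s : Int) (hs : 0 < s) :
    generate_base_field s =
      ((List.range (s ^ 2).toNat).foldl
        (fun st r => (List.range (s ^ 2).toNat).foldl (fun st c => gFN s st r c) st)
        ((List.range (s ^ 2).toNat).map (fun _ => (List.range (s ^ 2).toNat).map (fun _ => (0 : Int))),
         (List.range (s ^ 2).toNat).map (fun i : Nat => ((i : Int) + 1)))).1 := by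
  unfold generate_base_field
  simp only []
  refine congrArg Prod.fst ?_
  have step1 :
      (fun (st : List (List Int) × List Int) (brow : Int) =>
        List.foldl
          (fun st row =>
            List.foldl
              (fun st bcol =>
                List.foldl
                  (fun st col =>
                    if row = 0 ∧ brow = 0 then
                      match PySem.List.pop? st.2 with
                      | some (v, rest) => (pySet2 st.1 (brow * s + row) (bcol * s + col) v, rest)
                      | none => st
                    else
                      (pySet2 st.1 (brow * s + row) (bcol * s + col)
                          (PySem.List.pyGetD (PySem.List.pyGetD st.1 (brow * s + row - brow * s - row) [])
                            (PySem.Int.mod (bcol * s + col - s * row - brow) (s ^ 2)) 0),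
                        st.2))
                  st (PySem.List.pyRange 0 s 1))
              st (PySem.List.pyRange 0 s 1))
          st (PySem.List.pyRange 0 s 1))
      = (fun st brow =>
        (PySem.List.pyRange 0 s 1).foldl
          (fun st row => (PySem.List.pyRange 0 (s ^ 2) 1).foldl (gbodyInt s brow row) st) st) := by
    funext st brow
    refine PySem.List.foldl_congr_mem _ _ _ _ ?_
    intro acc row _
    exact inner_flatten s hs.le brow row acc
  rw [step1]
  have step2 :
      List.foldl
        (fun (st : List (List Int) × List Int) (brow : Int) =>
          (PySem.List.pyRange 0 s 1).foldl
            (fun st row => (PySem.List.pyRange 0 (s ^ 2) 1).foldl (gbodyInt s brow row) st) st)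
        ((PySem.List.pyRange 0 (s ^ 2) 1).map
            (fun _ => (PySem.List.pyRange 0 (s ^ 2) 1).map (fun _ => (0 : Int))),
         (PySem.List.pyRange 0 (s ^ 2) 1).map (fun i => i + 1))
        (PySem.List.pyRange 0 s 1)
      = List.foldl
        (fun st brow =>
          (PySem.List.pyRange 0 s 1).foldl
            (fun st row =>
              (PySem.List.pyRange 0 (s ^ 2) 1).foldl
                (fun st c => gFInt s st (brow * s + row) c) st) st)
        ((PySem.List.pyRange 0 (s ^ 2) 1).map
            (fun _ => (PySem.List.pyRange 0 (s ^ 2) 1).map (fun _ => (0 : Int))),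
         (PySem.List.pyRange 0 (s ^ 2) 1).map (fun i => i + 1))
        (PySem.List.pyRange 0 s 1) := by
    refine PySem.List.foldl_congr_mem _ _ _ _ ?_
    intro acc brow hbrow
    refine PySem.List.foldl_congr_mem _ _ _ _ ?_
    intro acc2 row hrow
    refine PySem.List.foldl_congr_mem _ _ _ _ ?_
    intro acc3 c _
    rw [PySem.List.mem_pyRange_one] at hbrow hrow
    exact body_canon s hs brow row hbrow.1 hbrow.2 hrow.1 hrow.2 acc3 c
  rw [step2]
  rw [flatten s hs.le
    (fun st r => (PySem.List.pyRange 0 (s ^ 2) 1).foldl (fun st c => gFInt s st r c) st)]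
  simp only [PySem.List.pyRange_one, sub_zero, List.foldl_map, List.map_map,
    Function.comp_def, zero_add, FInt_cast s hs]

-- reading a cell after a fold of writes at pairwise-distinct positions
theorem foldl_set_getElem? {α : Type} (v : Nat → α) :
    ∀ (cs : List Nat), cs.Nodup → ∀ (l : List α) (q : Nat),
      (cs.foldl (fun l c => l.set c (v c)) l)[q]? =
        if q ∈ cs ∧ q < l.length then some (v q) else l[q]? := by
  intro cs
  induction cs with
  | nil => intro _ l q; simp
  | cons c cs ih =>
    intro hnd l q
    simp only [List.foldl_cons]
    rw [ih (List.Nodup.of_cons hnd), List.length_set]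
    have hcc : c ∉ cs := (List.nodup_cons.mp hnd).1
    by_cases hq : q ∈ cs
    · have hqc : q ≠ c := fun h => hcc (h ▸ hq)
      by_cases h2 : q < l.length
      · simp [hq, h2, List.mem_cons]
      · simp [hq, h2, List.mem_cons]
    · rw [List.getElem?_set]
      by_cases hqc : q = c
      · subst hqc
        by_cases h2 : q < l.length <;> simp [hq, h2, List.mem_cons]
      · simp [hq, hqc, List.mem_cons, Ne.symm hqc]
  
-- writing every cell of a length-N list is building it afresh
theorem fill_eq_map {α : Type} (N : Nat) (v : Nat → α) (l : List α) (hl : l.length = N) :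
    (List.range N).foldl (fun l c => l.set c (v c)) l = (List.range N).map v := by
  apply List.ext_getElem?
  intro q
  rw [foldl_set_getElem? v _ List.nodup_range l q, List.getElem?_map]
  by_cases hq : q < N
  · simp [List.mem_range, hq, hl]
  · have h1 : l[q]? = none := List.getElem?_eq_none (by omega)
    have h2 : (List.range N)[q]? = none := List.getElem?_eq_none (by simp; omega)
    simp [List.mem_range, hq, h1]

-- cell-by-cell writes into row 0, value independent of the grid
theorem row_collapse0 (v : Nat → Int) :
    ∀ (L : List Nat) (g : List (List Int)), 0 < g.length →
      L.foldl (fun G c => gsetg G 0 c (v c)) g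
        = g.set 0 (L.foldl (fun row c => row.set c (v c)) (g.getD 0 [])) := by
  intro L
  induction L with
  | nil =>
    intro g hg
    have : g.getD 0 [] = g[0] := List.getD_eq_getElem g [] hg
    simp only [List.foldl_nil, this]
    exact (List.set_getElem_self hg).symm
  | cons c L ih =>
    intro g hg
    simp only [List.foldl_cons]
    rw [ih _ (by simp [gsetg, hg])]
    unfold gsetg
    rw [List.set_set]
    congr 1
    have h1 : (g.set 0 ((g.getD 0 []).set c (v c))).getD 0 [] = (g.getD 0 []).set c (v c) := by
      rw [List.getD_eq_getElem?_getD, List.getElem?_set_self (by simpa using hg)]; rfl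
    rw [h1]

-- cell-by-cell writes into row r > 0, value read from row 0 of the current grid
theorem row_collapse (w : List Int → Nat → Int) (r : Nat) (hr : 0 < r) :
    ∀ (L : List Nat) (g : List (List Int)), r < g.length →
      L.foldl (fun G c => gsetg G r c (w (G.getD 0 []) c)) g
        = g.set r (L.foldl (fun row c => row.set c (w (g.getD 0 []) c)) (g.getD r [])) := by
  intro L
  induction L with
  | nil =>
    intro g hg
    have : g.getD r [] = g[r] := List.getD_eq_getElem g [] hg
    simp only [List.foldl_nil, this]
    exact (List.set_getElem_self hg).symm
  | cons c L ih =>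
    intro g hg
    simp only [List.foldl_cons]
    rw [ih _ (by simp [gsetg, hg])]
    unfold gsetg
    rw [List.set_set]
    have h0 : (g.set r ((g.getD r []).set c (w (g.getD 0 []) c))).getD 0 []
        = g.getD 0 [] := by
      rw [List.getD_eq_getElem?_getD, List.getElem?_set_ne (by omega), List.getD_eq_getElem?_getD]
    have hrr : (g.set r ((g.getD r []).set c (w (g.getD 0 []) c))).getD r []
        = (g.getD r []).set c (w (g.getD 0 []) c) := by
      rw [List.getD_eq_getElem?_getD, List.getElem?_set_self (by simpa using hg)]; rfl
    rw [h0, hrr]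

-- the (brow,row) = (0,0) iteration: numbers.pop() written into row 0 cell by cell
def gpop (st : List (List Int) × List Int) (c : Nat) : List (List Int) × List Int :=
  match PySem.List.pop? st.2 with
  | some (v, rest) => (gsetg st.1 0 c v, rest)
  | none => st

theorem gpop_eq (g : List (List Int)) (nums : List Int) (x : Int) (c : Nat) :
    gpop (g, nums ++ [x]) c = (gsetg g 0 c x, nums) := by
  simp [gpop, PySem.List.pop?_last]

theorem pop_phase (N : Nat) :
    ∀ (j : Nat), j ≤ N → ∀ (g : List (List Int)),
      (List.range' (N - j) j).foldl gpop
          (g, (List.range j).map (fun i : Nat => ((i : Int) + 1)))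
        = ((List.range' (N - j) j).foldl
            (fun G c => gsetg G 0 c ((N : Int) - (c : Int))) g, []) := by
  intro j
  induction j with
  | zero => intro _ g; simp
  | succ j ih =>
    intro hj g
    have hNj : N - (j + 1) + 1 = N - j := by omega
    have hv : ((N : Int) - ((N - (j + 1) : Nat) : Int)) = (j : Int) + 1 := by omega
    rw [List.range'_succ, hNj, List.range_succ, List.map_append]
    simp only [List.foldl_cons, List.map_cons, List.map_nil]
    rw [gpop_eq, ih (by omega), hv]

theorem foldl_pair_fst {α β γ : Type} (f : α → γ → α) :
    ∀ (L : List γ) (g : α) (x : β),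
      L.foldl (fun st c => (f st.1 c, st.2)) (g, x) = (L.foldl f g, x) := by
  intro L
  induction L with
  | nil => intro g x; rfl
  | cons c L ih => intro g x; simp only [List.foldl_cons]; exact ih _ _

-- for rows r ≠ 0 the numbers list rides along unchanged
theorem outer_pair (s : Int) (rs : List Nat) (h : ∀ r ∈ rs, r ≠ 0) :
    ∀ (g : List (List Int)) (nums : List Int),
      rs.foldl
          (fun st r => (List.range (s ^ 2).toNat).foldl (fun st c => gFN s st r c) st) (g, nums)
        = (rs.foldl
            (fun G r => (List.range (s ^ 2).toNat).foldl
              (fun G c => gsetg G r c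
                ((G.getD 0 []).getD
                  (PySem.Int.mod ((c : Int) - gshift s (r : Int)) (s ^ 2)).toNat 0)) G) g,
           nums) := by
  induction rs with
  | nil => intro g nums; rfl
  | cons r rs ih =>
    intro g nums
    simp only [List.foldl_cons]
    have hr : r ≠ 0 := h r (List.mem_cons_self ..)
    have hbody : ∀ (st : List (List Int) × List Int) (c : Nat), c ∈ List.range (s ^ 2).toNat →
        gFN s st r c
          = ((fun G c => gsetg G r c
              ((G.getD 0 []).getD
                (PySem.Int.mod ((c : Int) - gshift s (r : Int)) (s ^ 2)).toNat 0)) st.1 c, st.2) := by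
      intro st c _
      simp [gFN, hr]
    rw [PySem.List.foldl_congr_mem _ _ _ _ (fun acc c hc => hbody acc c hc),
      foldl_pair_fst
        (fun G c => gsetg G r c
          ((G.getD 0 []).getD (PySem.Int.mod ((c : Int) - gshift s (r : Int)) (s ^ 2)).toNat 0))
        (List.range (s ^ 2).toNat) g nums]
    exact ih (fun r' h' => h r' (List.mem_cons_of_mem _ h')) _ _

-- each remaining row is rebuilt wholesale from the (unchanging) row 0
theorem outer_grid (s : Int) :
    ∀ (rs : List Nat) (g : List (List Int)),
      (∀ r ∈ rs, 0 < r ∧ r < g.length) → (∀ row ∈ g, row.length = (s ^ 2).toNat) →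
      rs.foldl
          (fun G r => (List.range (s ^ 2).toNat).foldl
            (fun G c => gsetg G r c
              ((G.getD 0 []).getD
                (PySem.Int.mod ((c : Int) - gshift s (r : Int)) (s ^ 2)).toNat 0)) G) g
        = rs.foldl (fun G r => G.set r (gmkrow s (g.getD 0 []) r)) g := by
  intro rs
  induction rs with
  | nil => intro g _ _; rfl
  | cons r rs ih =>
    intro g hr hrow
    have hr0 := hr r (List.mem_cons_self ..)
    simp only [List.foldl_cons]
    rw [row_collapse
      (fun row0 c => row0.getD (PySem.Int.mod ((c : Int) - gshift s (r : Int)) (s ^ 2)).toNat 0)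
      r hr0.1 (List.range (s ^ 2).toNat) g hr0.2]
    have hglen : (g.getD r []).length = (s ^ 2).toNat := by
      have : g.getD r [] = g[r] := List.getD_eq_getElem g [] hr0.2
      rw [this]
      exact hrow _ (List.getElem_mem hr0.2)
    rw [fill_eq_map _ _ _ hglen]
    have hfold : (List.range (s ^ 2).toNat).map
        (fun c : Nat => (g.getD 0 []).getD
          (PySem.Int.mod ((c : Int) - gshift s (r : Int)) (s ^ 2)).toNat 0)
        = gmkrow s (g.getD 0 []) r := rfl
    rw [hfold]
    have hset0 : (g.set r (gmkrow s (g.getD 0 []) r)).getD 0 [] = g.getD 0 [] := by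
      rw [List.getD_eq_getElem?_getD, List.getElem?_set_ne (by omega),
        List.getD_eq_getElem?_getD]
    rw [ih (g.set r (gmkrow s (g.getD 0 []) r))
      (by intro r' h'; have := hr r' (List.mem_cons_of_mem _ h'); simpa using this)
      (by
        intro row hmem
        rcases List.mem_or_eq_of_mem_set hmem with h | h
        · exact hrow _ h
        · subst h; simp [gmkrow]), hset0]

-- ===== B-side lemmas =====
def gfr (s : Int) : List Int := PySem.List.pyRange (s ^ 2) 0 (-1)

-- canonical body of B's double loop, indexed by the row number r
def gBInt (s : Int) (grid : List (List Int)) (r : Int) : List (List Int) :=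
  PySem.List.pySetD grid r
    (PySem.List.slice (gfr s) (some (PySem.Int.mod (-(gshift s r)) (s ^ 2))) none ++
     PySem.List.slice (gfr s) none (some (PySem.Int.mod (-(gshift s r)) (s ^ 2))))

theorem bbody_canon (s : Int) (hs : 0 < s) (brow row : Int)
    (hb : 0 ≤ brow) (hr : 0 ≤ row) (hr' : row < s) (grid : List (List Int)) :
    PySem.List.pySetD grid (brow * s + row)
      (PySem.List.slice (gfr s) (some (PySem.Int.mod (-(s * row + brow)) (s ^ 2))) none ++
       PySem.List.slice (gfr s) none (some (PySem.Int.mod (-(s * row + brow)) (s ^ 2))))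
      = gBInt s grid (brow * s + row) := by
  have hdm := block_divmod hs hb hr hr'
  unfold gBInt
  rw [show gshift s (brow * s + row) = s * row + brow from by unfold gshift; rw [hdm.1, hdm.2]]

theorem gBInt_cast (s : Int) (hs : 0 < s) (grid : List (List Int)) (r : Nat) :
    gBInt s grid (r : Int)
      = grid.set r
          ((gfr s).drop (PySem.Int.mod (-(gshift s (r : Int))) (s ^ 2)).toNat ++
           (gfr s).take (PySem.Int.mod (-(gshift s (r : Int))) (s ^ 2)).toNat) := by
  have hm : (0 : Int) ≤ PySem.Int.mod (-(gshift s (r : Int))) (s ^ 2) :=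
    PySem.Int.mod_nonneg _ (by positivity)
  unfold gBInt
  rw [PySem.List.slice_from _ hm, PySem.List.slice_to _ hm,
    PySem.List.pySetD_of_nonneg _ _ (by positivity)]
  simp

-- where Python's c - g lands modulo n, written through k = (-g) % n
theorem mod_rot (nI g : Int) (hn : 0 < nI) (c k : Nat)
    (hk : (k : Int) = PySem.Int.mod (-g) nI) (hkn : (k : Int) < nI) (hc : (c : Int) < nI) :
    PySem.Int.mod ((c : Int) - g) nI
      = if (c : Int) + (k : Int) < nI then (c : Int) + (k : Int)
        else (c : Int) + (k : Int) - nI := by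
  rw [PySem.Int.mod_eq_emod_of_pos hn] at hk ⊢
  have hdecomp : -g % nI + nI * (-g / nI) = -g := Int.emod_add_mul_ediv _ _
  have hsplit : (c : Int) - g = ((c : Int) + (k : Int)) + nI * (-g / nI) := by
    rw [hk]; linarith
  rw [hsplit, Int.add_mul_emod_self_left]
  split_ifs with h
  · exact Int.emod_eq_of_lt (by positivity) h
  · have h0 : (0 : Int) ≤ (c : Int) + (k : Int) - nI := by omega
    have h1 : (c : Int) + (k : Int) - nI < nI := by omega
    have h2 : ((c : Int) + (k : Int)) = ((c : Int) + (k : Int) - nI) + nI * 1 := by ring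
    conv_lhs => rw [h2]
    rw [Int.add_mul_emod_self_left]
    exact Int.emod_eq_of_lt h0 h1

-- the rotated first row IS the closed-form row
theorem rot_eq (s : Int) (hs : 0 < s) (q : Nat) :
    (gfr s).drop (PySem.Int.mod (-(gshift s (q : Int))) (s ^ 2)).toNat ++
      (gfr s).take (PySem.Int.mod (-(gshift s (q : Int))) (s ^ 2)).toNat
    = (List.range (s ^ 2).toNat).map
        (fun c : Nat => s ^ 2 - PySem.Int.mod ((c : Int) - gshift s (q : Int)) (s ^ 2)) := by
  have hn : (0 : Int) < s ^ 2 := by positivity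
  have hfr : gfr s = (List.range (s ^ 2).toNat).map (fun i : Nat => s ^ 2 - (i : Int)) := by
    unfold gfr
    rw [PySem.List.pyRange_neg_one]
    simp
  have hfrlen : (gfr s).length = (s ^ 2).toNat := by rw [hfr]; simp
  have hm0 : (0 : Int) ≤ PySem.Int.mod (-(gshift s (q : Int))) (s ^ 2) :=
    PySem.Int.mod_nonneg _ hn
  have hmlt : PySem.Int.mod (-(gshift s (q : Int))) (s ^ 2) < s ^ 2 :=
    PySem.Int.mod_lt _ hn
  have hk : ((PySem.Int.mod (-(gshift s (q : Int))) (s ^ 2)).toNat : Int)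
      = PySem.Int.mod (-(gshift s (q : Int))) (s ^ 2) := Int.toNat_of_nonneg hm0
  have hklt : (PySem.Int.mod (-(gshift s (q : Int))) (s ^ 2)).toNat < (s ^ 2).toNat := by omega
  apply List.ext_getElem?
  intro c
  by_cases hc : c < (s ^ 2).toNat
  · have hcI : ((c : Nat) : Int) < s ^ 2 := by omega
    have hmod := mod_rot (s ^ 2) (gshift s (q : Int)) hn c
      (PySem.Int.mod (-(gshift s (q : Int))) (s ^ 2)).toNat (hk.trans rfl) (by omega) hcI
    rw [List.getElem?_map, List.getElem?_range hc]
    by_cases hsplit : c < (s ^ 2).toNat - (PySem.Int.mod (-(gshift s (q : Int))) (s ^ 2)).toNat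
    · rw [List.getElem?_append_left (by rw [List.length_drop, hfrlen]; omega),
        List.getElem?_drop, hfr, List.getElem?_map, List.getElem?_range (by omega)]
      simp only [Option.map_some, Option.some.injEq]
      rw [hmod, if_pos (by omega)]
      push_cast
      omega
    · rw [List.getElem?_append_right (by rw [List.length_drop, hfrlen]; omega)]
      rw [List.length_drop, hfrlen]
      rw [List.getElem?_take_of_lt (by omega), hfr, List.getElem?_map,
        List.getElem?_range (by omega)]
      simp only [Option.map_some, Option.some.injEq]
      rw [hmod, if_neg (by omega)]
      omega
  · have hlen : ((gfr s).drop (PySem.Int.mod (-(gshift s (q : Int))) (s ^ 2)).toNat ++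
        (gfr s).take (PySem.Int.mod (-(gshift s (q : Int))) (s ^ 2)).toNat).length
        = (s ^ 2).toNat := by
      rw [List.length_append, List.length_drop, List.length_take, hfrlen]; omega
    rw [List.getElem?_eq_none (by omega), List.getElem?_eq_none (by simp; omega)]

theorem B_closed (s : Int) (hs : 0 < s) :
    generate_base_field_alt s
      = (List.range (s ^ 2).toNat).map
          (fun q : Nat => (List.range (s ^ 2).toNat).map
            (fun c : Nat => s ^ 2 - PySem.Int.mod ((c : Int) - gshift s (q : Int)) (s ^ 2))) := by
  unfold generate_base_field_alt
  simp only []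
  have step1 :
      List.foldl
        (fun grid brow =>
          List.foldl
            (fun grid row =>
              PySem.List.pySetD grid (brow * s + row)
                (PySem.List.slice (PySem.List.pyRange (s ^ 2) 0 (-1))
                    (some (PySem.Int.mod (-(s * row + brow)) (s ^ 2))) none ++
                 PySem.List.slice (PySem.List.pyRange (s ^ 2) 0 (-1)) none
                    (some (PySem.Int.mod (-(s * row + brow)) (s ^ 2)))))
            grid (PySem.List.pyRange 0 s 1))
        ((PySem.List.pyRange 0 (s ^ 2) 1).map
          (fun _ => (PySem.List.pyRange 0 (s ^ 2) 1).map (fun _ => (0 : Int))))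
        (PySem.List.pyRange 0 s 1)
      = List.foldl
        (fun grid brow =>
          List.foldl (fun grid row => gBInt s grid (brow * s + row))
            grid (PySem.List.pyRange 0 s 1))
        ((PySem.List.pyRange 0 (s ^ 2) 1).map
          (fun _ => (PySem.List.pyRange 0 (s ^ 2) 1).map (fun _ => (0 : Int))))
        (PySem.List.pyRange 0 s 1) := by
    refine PySem.List.foldl_congr_mem _ _ _ _ ?_
    intro acc brow hbrow
    refine PySem.List.foldl_congr_mem _ _ _ _ ?_
    intro acc2 row hrow
    rw [PySem.List.mem_pyRange_one] at hbrow hrow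
    exact bbody_canon s hs brow row hbrow.1 hrow.1 hrow.2 acc2
  rw [step1, flatten s hs.le (fun grid r => gBInt s grid r)]
  simp only [PySem.List.pyRange_one, sub_zero, List.foldl_map, List.map_map,
    Function.comp_def, zero_add]
  have step2 : ∀ (g : List (List Int)) (r : Nat), gBInt s g (r : Int)
      = g.set r
          ((gfr s).drop (PySem.Int.mod (-(gshift s (r : Int))) (s ^ 2)).toNat ++
           (gfr s).take (PySem.Int.mod (-(gshift s (r : Int))) (s ^ 2)).toNat) :=
    fun g r => gBInt_cast s hs g r
  simp only [step2]
  apply List.ext_getElem?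
  intro q
  rw [foldl_set_getElem?
    (fun r : Nat => (gfr s).drop (PySem.Int.mod (-(gshift s (r : Int))) (s ^ 2)).toNat ++
      (gfr s).take (PySem.Int.mod (-(gshift s (r : Int))) (s ^ 2)).toNat)
    _ List.nodup_range _ q]
  by_cases hq : q < (s ^ 2).toNat
  · rw [if_pos ⟨List.mem_range.mpr hq, by simp [hq]⟩, List.getElem?_map,
      List.getElem?_range hq]
    simp only [Option.map_some]
    rw [rot_eq s hs q]
  · rw [if_neg (by simp [List.mem_range]; omega), List.getElem?_eq_none (by simp; omega),
      List.getElem?_eq_none (by simp; omega)]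

-- named initial state and first row (definitionally the ones appearing in canon)
def ggrid0 (s : Int) : List (List Int) :=
  (List.range (s ^ 2).toNat).map (fun _ => (List.range (s ^ 2).toNat).map (fun _ => (0 : Int)))
def gnums0 (s : Int) : List Int :=
  (List.range (s ^ 2).toNat).map (fun i : Nat => ((i : Int) + 1))
def gR0 (s : Int) : List Int :=
  (List.range (s ^ 2).toNat).map (fun c : Nat => ((((s ^ 2).toNat : Nat) : Int) - c))

theorem gshift_zero (s : Int) (hs : 0 < s) : gshift s 0 = 0 := by
  unfold gshift
  rw [PySem.Int.mod_eq_emod_of_pos hs, PySem.Int.floordiv_eq_ediv_of_pos hs]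
  simp

theorem mkrow_eq (s : Int) (hs : 0 < s) (q : Nat) :
    gmkrow s (gR0 s) q
      = (List.range (s ^ 2).toNat).map
          (fun c : Nat => s ^ 2 - PySem.Int.mod ((c : Int) - gshift s (q : Int)) (s ^ 2)) := by
  have hn : (0 : Int) < s ^ 2 := by positivity
  unfold gmkrow
  apply List.map_congr_left
  intro c _
  have hk1 : (((PySem.Int.mod ((c : Int) - gshift s (q : Int)) (s ^ 2)).toNat : Int))
      = PySem.Int.mod ((c : Int) - gshift s (q : Int)) (s ^ 2) :=
    Int.toNat_of_nonneg (PySem.Int.mod_nonneg _ hn)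
  have hk2 : (PySem.Int.mod ((c : Int) - gshift s (q : Int)) (s ^ 2)).toNat < (s ^ 2).toNat := by
    have := PySem.Int.mod_lt ((c : Int) - gshift s (q : Int)) hn
    omega
  have hget : (gR0 s).getD (PySem.Int.mod ((c : Int) - gshift s (q : Int)) (s ^ 2)).toNat 0
      = (((s ^ 2).toNat : Int)) - ((PySem.Int.mod ((c : Int) - gshift s (q : Int)) (s ^ 2)).toNat : Int) := by
    unfold gR0
    rw [List.getD_eq_getElem?_getD, List.getElem?_map, List.getElem?_range hk2]
    rfl
  rw [hget, hk1, Int.toNat_of_nonneg hn.le]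

theorem row0_eq (s : Int) (hs : 0 < s) : gmkrow s (gR0 s) 0 = gR0 s := by
  have hn : (0 : Int) < s ^ 2 := by positivity
  rw [mkrow_eq s hs 0]
  unfold gR0
  apply List.map_congr_left
  intro c hc
  rw [List.mem_range] at hc
  have h1 : ((0 : Nat) : Int) = (0 : Int) := rfl
  rw [h1, gshift_zero s hs, sub_zero]
  have h2 : PySem.Int.mod ((c : Int)) (s ^ 2) = (c : Int) := by
    rw [PySem.Int.mod_eq_emod_of_pos hn]
    exact Int.emod_eq_of_lt (by positivity) (by omega)
  rw [h2, Int.toNat_of_nonneg hn.le]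

theorem A_closed (s : Int) (hs : 0 < s) :
    generate_base_field s
      = (List.range (s ^ 2).toNat).map
          (fun q : Nat => (List.range (s ^ 2).toNat).map
            (fun c : Nat => s ^ 2 - PySem.Int.mod ((c : Int) - gshift s (q : Int)) (s ^ 2))) := by
  have hn : (0 : Int) < s ^ 2 := by positivity
  have hN : 0 < (s ^ 2).toNat := by omega
  obtain ⟨M, hM⟩ : ∃ M, (s ^ 2).toNat = M + 1 := ⟨(s ^ 2).toNat - 1, by omega⟩
  have houter : List.range (s ^ 2).toNat = 0 :: List.range' 1 M := by
    rw [hM, List.range_eq_range', List.range'_succ]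
  have hg0len : (ggrid0 s).length = (s ^ 2).toNat := by simp [ggrid0]
  have hg1len : ((ggrid0 s).set 0 (gR0 s)).length = (s ^ 2).toNat := by simp [hg0len]
  rw [canon s hs]
  show ((List.range (s ^ 2).toNat).foldl
      (fun st r => (List.range (s ^ 2).toNat).foldl (fun st c => gFN s st r c) st)
      (ggrid0 s, gnums0 s)).1
    = (List.range (s ^ 2).toNat).map
        (fun q : Nat => (List.range (s ^ 2).toNat).map
          (fun c : Nat => s ^ 2 - PySem.Int.mod ((c : Int) - gshift s (q : Int)) (s ^ 2)))
  refine Eq.trans (congrArg (fun L : List Nat =>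
    ((L.foldl (fun st r => (List.range (s ^ 2).toNat).foldl (fun st c => gFN s st r c) st)
      (ggrid0 s, gnums0 s)).1)) houter) ?_
  simp only [List.foldl_cons]
  -- the (brow,row) = (0,0) pass pops numbers into row 0
  have h00 : (fun (st : List (List Int) × List Int) (c : Nat) => gFN s st 0 c) = gpop := by
    funext st c
    cases hpop : PySem.List.pop? st.2 <;> simp [gFN, gpop, hpop]
  rw [h00]
  have hpop0 : (List.range (s ^ 2).toNat).foldl gpop (ggrid0 s, gnums0 s)
      = ((ggrid0 s).set 0 (gR0 s), []) := by
    have h := pop_phase (s ^ 2).toNat (s ^ 2).toNat le_rfl (ggrid0 s)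
    simp only [Nat.sub_self, ← List.range_eq_range'] at h
    have hnums : gnums0 s = (List.range (s ^ 2).toNat).map (fun i : Nat => ((i : Int) + 1)) := rfl
    rw [hnums, h, row_collapse0 _ _ _ (by omega)]
    have hrow0 : (ggrid0 s).getD 0 [] = (List.range (s ^ 2).toNat).map (fun _ => (0 : Int)) := by
      unfold ggrid0
      rw [List.getD_eq_getElem?_getD, List.getElem?_map, List.getElem?_range hN]
      rfl
    rw [hrow0, fill_eq_map (s ^ 2).toNat _ _ (by simp)]
    rfl
  rw [hpop0]
  -- remaining rows: numbers rides along, each row is rebuilt from row 0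
  rw [outer_pair s (List.range' 1 M)
    (by intro r hr; rw [List.mem_range'_1] at hr; omega) ((ggrid0 s).set 0 (gR0 s)) []]
  show (List.range' 1 M).foldl
      (fun G r => (List.range (s ^ 2).toNat).foldl
        (fun G c => gsetg G r c
          ((G.getD 0 []).getD
            (PySem.Int.mod ((c : Int) - gshift s (r : Int)) (s ^ 2)).toNat 0)) G)
      ((ggrid0 s).set 0 (gR0 s))
    = _
  rw [outer_grid s (List.range' 1 M) ((ggrid0 s).set 0 (gR0 s))
    (by intro r hr; rw [List.mem_range'_1] at hr; constructor <;> omega)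
    (by
      intro row hmem
      rcases List.mem_or_eq_of_mem_set hmem with h | h
      · unfold ggrid0 at h
        rcases List.mem_map.mp h with ⟨a, _, ha⟩
        rw [← ha]; simp
      · subst h; simp [gR0])]
  have hget1 : ((ggrid0 s).set 0 (gR0 s)).getD 0 [] = gR0 s := by
    rw [List.getD_eq_getElem?_getD, List.getElem?_set_self (by omega)]
    rfl
  rw [hget1]
  -- read the final grid row by row
  apply List.ext_getElem?
  intro q
  rw [foldl_set_getElem? (fun r => gmkrow s (gR0 s) r) _ (List.nodup_range' 1 Nat.one_pos)
    ((ggrid0 s).set 0 (gR0 s)) q, List.getElem?_map]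
  by_cases hq : q < (s ^ 2).toNat
  · by_cases hq0 : q = 0
    · subst hq0
      have hmem : (0 : Nat) ∉ List.range' 1 M := by
        rw [List.mem_range'_1]; omega
      rw [if_neg (by simp [hmem]), List.getElem?_set_self (by omega),
        List.getElem?_range hq]
      simp only [Option.map_some]
      rw [← mkrow_eq s hs 0, row0_eq s hs]
    · have hmem : q ∈ List.range' 1 M := by rw [List.mem_range'_1]; omega
      rw [if_pos ⟨hmem, by omega⟩, List.getElem?_range hq]
      simp only [Option.map_some]
      rw [mkrow_eq s hs q]
  · have h1 : q ∉ List.range' 1 M := by rw [List.mem_range'_1]; omega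
    rw [if_neg (by simp [h1]), List.getElem?_eq_none (by simp [hg1len]; omega),
      List.getElem?_eq_none (le_of_not_gt (by simpa using hq))]
    rfl

-- ===== VERDICT (by name: the statement is the Claim_ definition above) =====

theorem generate_base_field_spec : Claim_equal_generate_base_field := by
  unfold Claim_equal_generate_base_field
  intro size _
  unfold Spec_generate_base_field
  by_cases h : size ≤ 0
  · have hnil : PySem.List.pyRange 0 size 1 = [] := PySem.List.pyRange_one_eq_nil h
    unfold generate_base_field generate_base_field_alt
    simp only [hnil, List.foldl_nil]
  · have h' : 0 < size := by omega
    rw [A_closed size h', B_closed size h']
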